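-- pv_equiv track=rewrite | github.com/watertap-org/watertap | watertap/tools/parameter_sweep/tests/test_parameter_sweep.py | dummy_kernel_logic
-- ===== SOURCE A (Python) =====
-- def dummy_kernel_logic(solution_succesful):
--     init_state = [True]
--     solved_state = [False]
--     for sf in solution_succesful:
--         if sf and init_state[-1]:
--             # we solved model from init and/or prior solved state
--             init_state.append(True)
--             solved_state.append(True)
--         elif sf and init_state[-1] == False:
--             # we try to solve ,but first init
--             init_state.append(True)
--             solved_state.append(False)
--             # solve is succesful
--             init_state.append(True)
--             solved_state.append(True)
--         else:
--             if solved_state[-1]: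
--                 # this means solution failed after
--                 # on model that was solved with applied sweep params
--                 # we add failed states
--                 init_state.append(False)
--                 solved_state.append(False)
--                 # kernel reinits model and then tries solving again
--                 init_state.append(True)
--                 solved_state.append(False)
--                 # but it fails again
--                 init_state.append(False)
--                 solved_state.append(False)
--             else:
--                 # we are solving from failed solve, so we reinit
--                 init_state.append(True)
--                 solved_state.append(False)
--                 # but fail again
--                 init_state.append(False)
--                 solved_state.append(False)
--                 # kernel solving from inited state, so we failed we move on
--     return init_state, solved_state
-- ===== SOURCE B (Python) =====
-- # Stateless staged computation: the pairs appended for each flag depend only on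
-- # (previous flag, current flag), so zip flags with their predecessors, map each
-- # adjacent pair to a fixed block, flatten, and unzip -- no running state.
-- def dummy_kernel_logic(solution_succesful):
--     sfs = list(solution_succesful)
--     prevs = [None] + sfs[:-1]
--
--     def block(prev, sf):
--         if sf:
--             return [(True, False), (True, True)] if prev is False else [(True, True)]
--         else:
--             return [(False, False), (True, False), (False, False)] if prev is True \
--                 else [(True, False), (False, False)]
--
--     pairs = [(True, False)] + [p for pr, sf in zip(prevs, sfs) for p in block(pr, sf)]
--     init_state = [i for i, _ in pairs]
--     solved_state = [s for _, s in pairs]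
--     return init_state, solved_state
-- ===== Notes on version B (the rewrite author's own statement) =====
-- stated objective: alternative
-- what changed: Replaces A's stateful loop that inspects the tails of the growing lists with a stateless staged pipeline: each flag's appended block depends only on (previous flag, current flag), so B zips flags with their predecessors, maps adjacent pairs to fixed blocks, flattens, and unzips.
import Mathlib
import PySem

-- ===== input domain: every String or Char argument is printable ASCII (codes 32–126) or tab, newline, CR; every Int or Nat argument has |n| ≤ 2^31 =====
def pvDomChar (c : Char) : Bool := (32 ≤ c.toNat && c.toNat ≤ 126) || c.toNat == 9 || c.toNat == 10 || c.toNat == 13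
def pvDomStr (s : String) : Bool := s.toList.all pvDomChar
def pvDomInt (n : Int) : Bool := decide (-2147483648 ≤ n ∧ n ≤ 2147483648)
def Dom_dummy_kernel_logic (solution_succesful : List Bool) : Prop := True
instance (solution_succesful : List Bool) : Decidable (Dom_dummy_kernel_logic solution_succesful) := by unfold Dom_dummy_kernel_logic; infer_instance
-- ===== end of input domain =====

-- B replaces A's stateful loop reading list[-1] with a stateless zip-with-predecessor /
-- map-to-block / flatten / unzip pipeline (objective: alternative).

-- ===== PORT A =====
-- loop body of A; init_state[-1]/solved_state[-1] ported as getLastD (exact: both lists are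
-- nonempty throughout, so Python's [-1] never raises and equals getLastD)
def pvStepA (acc : List Bool × List Bool) (sf : Bool) : List Bool × List Bool :=
  if sf && acc.1.getLastD true then
    (acc.1 ++ [true], acc.2 ++ [true])
  else if sf && (acc.1.getLastD true == false) then
    (acc.1 ++ [true, true], acc.2 ++ [false, true])
  else
    if acc.2.getLastD true then
      (acc.1 ++ [false, true, false], acc.2 ++ [false, false, false])
    else
      (acc.1 ++ [true, false], acc.2 ++ [false, false])

def dummy_kernel_logic (solution_succesful : List Bool) : List Bool × List Bool :=
  solution_succesful.foldl pvStepA ([true], [false])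

-- ===== PORT B =====
-- block(prev, sf) of Source B; Python's None → Option.none
def pvBlock (prev : Option Bool) (sf : Bool) : List (Bool × Bool) :=
  if sf then
    if prev = some false then [(true, false), (true, true)] else [(true, true)]
  else
    if prev = some true then [(false, false), (true, false), (false, false)]
    else [(true, false), (false, false)]

def dummy_kernel_logic_alt (solution_succesful : List Bool) : List Bool × List Bool :=
  let prevs : List (Option Bool) := none :: (solution_succesful.dropLast.map some)  -- [None] + sfs[:-1]
  let pairs := (true, false) :: ((prevs.zip solution_succesful).flatMap (fun q => pvBlock q.1 q.2))
  (pairs.map Prod.fst, pairs.map Prod.snd)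

-- ===== PRECONDITION & SPEC =====
def Spec_dummy_kernel_logic (solution_succesful : List Bool) (out : List Bool × List Bool) : Prop := out = dummy_kernel_logic_alt solution_succesful
instance (solution_succesful : List Bool) (out : List Bool × List Bool) : Decidable (Spec_dummy_kernel_logic solution_succesful out) := by unfold Spec_dummy_kernel_logic; infer_instance

-- ===== CLAIM (what is proved, stated in full; the proofs are below) =====
def Claim_equal_dummy_kernel_logic : Prop := ∀ (solution_succesful : List Bool), Dom_dummy_kernel_logic solution_succesful → Spec_dummy_kernel_logic solution_succesful (dummy_kernel_logic solution_succesful)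

-- ===== LEMMAS AND PROOFS =====

-- recursive form of B's zip/flatMap tail, used as the bridge in the induction
def pvBlocks (p : Option Bool) : List Bool → List (Bool × Bool)
  | [] => []
  | sf :: rest => pvBlock p sf ++ pvBlocks (some sf) rest

theorem pv_zip_eq : ∀ (s : List Bool) (p : Option Bool),
    ((p :: s.dropLast.map some).zip s).flatMap (fun q => pvBlock q.1 q.2) = pvBlocks p s := by
  intro s
  induction s with
  | nil => intro p; rfl
  | cons sf rest ih =>
    intro p
    cases rest with
    | nil => simp [pvBlocks]
    | cons b t =>
      have h : ((p :: (sf :: b :: t).dropLast.map some).zip (sf :: b :: t))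
          = (p, sf) :: ((some sf :: (b :: t).dropLast.map some).zip (b :: t)) := rfl
      rw [h, List.flatMap_cons, ih (some sf)]
      rfl

-- the pair of last elements of A's lists, as a function of the previous flag (none = initial)
def pvLastOf (p : Option Bool) : Bool × Bool :=
  match p with
  | none => (true, false)
  | some true => (true, true)
  | some false => (false, false)

theorem pv_fold_eq : ∀ (s : List Bool) (i sl : List Bool) (p : Option Bool),
    i ≠ [] → sl ≠ [] → i.getLastD true = (pvLastOf p).1 → sl.getLastD true = (pvLastOf p).2 →
    s.foldl pvStepA (i, sl) =
      (i ++ (pvBlocks p s).map Prod.fst, sl ++ (pvBlocks p s).map Prod.snd) := by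
  intro s
  induction s with
  | nil => intro i sl p _ _ _ _; simp [pvBlocks]
  | cons sf rest ih =>
    intro i sl p hi hsl ha hb
    rw [List.getLastD_eq_getLast?] at ha hb
    simp only [List.foldl_cons, pvBlocks, List.map_append, ← List.append_assoc]
    have hlast : ∀ (l : List Bool) (x y : Bool),
        (l ++ [x]).getLastD true = x ∧ (l ++ [x, y]).getLastD true = y ∧
        (l ++ [x, y, x]).getLastD true = x := by
      intro l x y
      refine ⟨?_, ?_, ?_⟩ <;> simp [List.getLastD_eq_getLast?, List.getLast?_append]
    rcases p with _ | b
    · -- p = none : last = (true, false)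
      cases sf
      · have e : pvStepA (i, sl) false = (i ++ [true, false], sl ++ [false, false]) := by
          simp [pvStepA, ha, hb, pvLastOf]
        rw [e]
        exact ih _ _ (some false) (by simp) (by simp) (hlast i true false).2.1 (hlast sl false false).2.1
      · have e : pvStepA (i, sl) true = (i ++ [true], sl ++ [true]) := by
          simp [pvStepA, ha, hb, pvLastOf]
        rw [e]
        exact ih _ _ (some true) (by simp) (by simp) (hlast i true false).1 (hlast sl true false).1
    · cases b
      · -- p = some false : last = (false, false)
        cases sf
        · have e : pvStepA (i, sl) false = (i ++ [true, false], sl ++ [false, false]) := by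
            simp [pvStepA, ha, hb, pvLastOf]
          rw [e]
          exact ih _ _ (some false) (by simp) (by simp) (hlast i true false).2.1 (hlast sl false false).2.1
        · have e : pvStepA (i, sl) true = (i ++ [true, true], sl ++ [false, true]) := by
            simp [pvStepA, ha, hb, pvLastOf]
          rw [e]
          exact ih _ _ (some true) (by simp) (by simp) (hlast i true true).2.1 (hlast sl false true).2.1
      · -- p = some true : last = (true, true)
        cases sf
        · have e : pvStepA (i, sl) false = (i ++ [false, true, false], sl ++ [false, false, false]) := by
            simp [pvStepA, ha, hb, pvLastOf]
          rw [e]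
          exact ih _ _ (some false) (by simp) (by simp) (hlast i false true).2.2 (hlast sl false false).2.2
        · have e : pvStepA (i, sl) true = (i ++ [true], sl ++ [true]) := by
            simp [pvStepA, ha, hb, pvLastOf]
          rw [e]
          exact ih _ _ (some true) (by simp) (by simp) (hlast i true false).1 (hlast sl true false).1

-- ===== VERDICT (by name: the statement is the Claim_ definition above) =====
theorem dummy_kernel_logic_spec : Claim_equal_dummy_kernel_logic := by
  intro s _
  unfold Spec_dummy_kernel_logic dummy_kernel_logic dummy_kernel_logic_alt
  rw [pv_fold_eq s [true] [false] none (by simp) (by simp) rfl rfl]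
  simp only []
  rw [pv_zip_eq s none]
  simp
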